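-- pv_equiv track=rewrite | github.com/kmedved/pbpstats | scripts/context_framework.py | render_file_index
-- ===== SOURCE A (Python) =====
-- from collections import defaultdict
-- from typing import Dict, Iterable, List, Optional, Sequence, Tuple
--
-- def _group_paths_for_index(paths: Sequence[str]) -> List[Tuple[str, List[str]]]:
--     groups: Dict[str, List[str]] = defaultdict(list)
--     for path in paths:
--         parts = path.split("/")
--         if len(parts) == 1:
--             group = "Root"
--         elif parts[0] == ".github":
--             group = ".github/workflows"
--         elif parts[0] == "pbpstats":
--             group = "/".join(parts[:2]) if len(parts) > 2 else "pbpstats"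
--         elif parts[0] == "tests":
--             group = "/".join(parts[:2]) if len(parts) > 2 else "tests"
--         elif parts[0] == "scripts":
--             group = "scripts"
--         else:
--             group = parts[0]
--         groups[group].append(path)
--     return sorted((group, sorted(values)) for group, values in groups.items())
--
-- def render_file_index(file_inventory: Sequence[str]) -> str:
--     lines = [
--         "Use this for oracle workflows when you want the model to request exact files by path.",
--         "Pair with `context/REPO_ARCHITECTURE.md`, not instead of it.",
--         "For implementation work, still provide raw source of the files you expect to edit.",
--         "",
--         "# File Index",
--         "",
--     ]
--     for group, paths in _group_paths_for_index(file_inventory):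
--         lines.append("## %s" % group)
--         for path in paths:
--             lines.append("- `%s`" % path)
--         lines.append("")
--     return "\n".join(lines).rstrip() + "\n"
-- ===== SOURCE B (Python) =====
-- from typing import Sequence
--
-- _HEADER = (
--     "Use this for oracle workflows when you want the model to request exact files by path.\n"
--     "Pair with `context/REPO_ARCHITECTURE.md`, not instead of it.\n"
--     "For implementation work, still provide raw source of the files you expect to edit.\n"
--     "\n"
--     "# File Index"
-- )
--
--
-- def _index_group_key(path: str) -> str:
--     parts = path.split("/")
--     if len(parts) == 1:
--         return "Root"
--     if parts[0] == ".github":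
--         return ".github/workflows"
--     if parts[0] == "pbpstats":
--         return "/".join(parts[:2]) if len(parts) > 2 else "pbpstats"
--     if parts[0] == "tests":
--         return "/".join(parts[:2]) if len(parts) > 2 else "tests"
--     if parts[0] == "scripts":
--         return "scripts"
--     return parts[0]
--
--
-- def render_file_index(file_inventory: Sequence[str]) -> str:
--     out = _HEADER
--     prev = None
--     for key, path in sorted((_index_group_key(p), p) for p in file_inventory):
--         if key != prev:
--             out += "\n\n## " + key
--             prev = key
--         out += "\n- `" + path + "`"
--     return out + "\n"
-- ===== Notes on version B (the rewrite author's own statement) =====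
-- stated objective: idiomatic
-- what changed: Replaces the defaultdict grouping, per-group sorting, lines-list rendering and join/rstrip post-processing with one sort of (group_key, path) pairs and a single pass that appends directly to the output string, emitting a group header whenever the key changes.
import Mathlib
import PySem

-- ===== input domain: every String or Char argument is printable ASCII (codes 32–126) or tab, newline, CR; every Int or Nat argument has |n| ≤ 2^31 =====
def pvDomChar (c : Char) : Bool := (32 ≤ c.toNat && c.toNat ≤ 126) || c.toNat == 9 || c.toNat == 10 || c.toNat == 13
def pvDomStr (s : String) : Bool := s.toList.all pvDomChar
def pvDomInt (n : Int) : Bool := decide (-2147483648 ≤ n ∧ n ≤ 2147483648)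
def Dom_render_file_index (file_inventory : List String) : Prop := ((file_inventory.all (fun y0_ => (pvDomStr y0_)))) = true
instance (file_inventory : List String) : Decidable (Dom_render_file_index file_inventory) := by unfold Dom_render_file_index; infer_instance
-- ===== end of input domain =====

-- B replaces A's defaultdict grouping, per-group sorts, lines list and join/rstrip post-pass
-- with one sort of (group_key, path) pairs and a single pass that appends directly to the
-- output string, emitting a header whenever the group key changes (idiomatic, not faster).

-- ===== PORT A =====
-- A's defaultdict(list): ported as a PySem.Dict with getD [] + insert (append).
def pvGroupsDict (paths : List String) : PySem.Dict String (List String) :=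
  paths.foldl (fun d path =>
    let parts := (PySem.Str.split? path "/").getD []   -- sep "/" ≠ "", so split? is always some
    let group :=
      if parts.length = 1 then "Root"
      else if (PySem.List.pyGet? parts 0).getD "" == ".github" then ".github/workflows"
      else if (PySem.List.pyGet? parts 0).getD "" == "pbpstats" then
        (if 2 < parts.length then PySem.Str.join "/" (PySem.List.slice parts none (some 2)) else "pbpstats")
      else if (PySem.List.pyGet? parts 0).getD "" == "tests" then
        (if 2 < parts.length then PySem.Str.join "/" (PySem.List.slice parts none (some 2)) else "tests")
      else if (PySem.List.pyGet? parts 0).getD "" == "scripts" then "scripts"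
      else (PySem.List.pyGet? parts 0).getD ""
    d.insert group (d.getD group [] ++ [path])) ⟨[]⟩

def _group_paths_for_index (paths : List String) : List (String × List String) :=
  PySem.List.sorted2
    ((pvGroupsDict paths).items.map (fun kv => (kv.1, PySem.List.sorted kv.2 (fun v => v))))
    (fun gv => gv.1) (fun gv => gv.2)

-- the fixed header lines A starts its lines list from
def pvHeader : List String :=
  [ "Use this for oracle workflows when you want the model to request exact files by path.",
    "Pair with `context/REPO_ARCHITECTURE.md`, not instead of it.",
    "For implementation work, still provide raw source of the files you expect to edit.",
    "",
    "# File Index",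
    "" ]

def render_file_index (file_inventory : List String) : String :=
  let lines := pvHeader
  let lines := (_group_paths_for_index file_inventory).foldl
    (fun lines gp =>
      (gp.2.foldl (fun ls path => ls ++ ["- `" ++ path ++ "`"]) (lines ++ ["## " ++ gp.1])) ++ [""])
    lines
  PySem.Str.rstrip (PySem.Str.join "\n" lines) ++ "\n"

-- ===== PORT B =====
def _index_group_key (path : String) : String :=
  let parts := (PySem.Str.split? path "/").getD []   -- sep "/" ≠ "", so split? is always some
  if parts.length = 1 then "Root"
  else if (PySem.List.pyGet? parts 0).getD "" == ".github" then ".github/workflows"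
  else if (PySem.List.pyGet? parts 0).getD "" == "pbpstats" then
    (if 2 < parts.length then PySem.Str.join "/" (PySem.List.slice parts none (some 2)) else "pbpstats")
  else if (PySem.List.pyGet? parts 0).getD "" == "tests" then
    (if 2 < parts.length then PySem.Str.join "/" (PySem.List.slice parts none (some 2)) else "tests")
  else if (PySem.List.pyGet? parts 0).getD "" == "scripts" then "scripts"
  else (PySem.List.pyGet? parts 0).getD ""

-- Source B's _HEADER literal
def pvHeaderB : String := "Use this for oracle workflows when you want the model to request exact files by path.\nPair with `context/REPO_ARCHITECTURE.md`, not instead of it.\nFor implementation work, still provide raw source of the files you expect to edit.\n\n# File Index"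

def render_file_index_alt (file_inventory : List String) : String :=
  let pairs := PySem.List.sorted2
    (file_inventory.map (fun p => (_index_group_key p, p)))
    (fun kp => kp.1) (fun kp => kp.2)
  let st := pairs.foldl
    (fun (st : String × Option String) q =>
      let st := if st.2 == some q.1 then st else (st.1 ++ "\n\n## " ++ q.1, some q.1)
      (st.1 ++ "\n- `" ++ q.2 ++ "`", st.2))
    (pvHeaderB, none)
  st.1 ++ "\n"

-- ===== PRECONDITION & SPEC =====
def Spec_render_file_index (file_inventory : List String) (out : String) : Prop := out = render_file_index_alt file_inventory
instance (file_inventory : List String) (out : String) : Decidable (Spec_render_file_index file_inventory out) := by unfold Spec_render_file_index; infer_instance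

-- ===== CLAIM (what is proved, stated in full; the proofs are below) =====
def Claim_equal_render_file_index : Prop := ∀ (file_inventory : List String), Dom_render_file_index file_inventory → Spec_render_file_index file_inventory (render_file_index file_inventory)

-- ===== LEMMAS AND PROOFS =====

-- canonical forms used only in the proofs
def pvGRP (paths : List String) (k : String) : List String :=
  PySem.List.sorted (paths.filter (fun p => _index_group_key p == k)) (fun v => v)

def pvSK (paths : List String) : List String :=
  PySem.List.sorted (PySem.List.dedup (paths.map _index_group_key)) (fun k => k)

-- the total preorder corresponding to Python's tuple comparison in sorted2
def pvLe {α κ₁ κ₂ : Type} [LinearOrder κ₁] [LinearOrder κ₂] (k1 : α → κ₁) (k2 : α → κ₂) (a b : α) : Prop :=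
  k1 a < k1 b ∨ (k1 a = k1 b ∧ k2 a ≤ k2 b)

theorem pvLe_trans {α κ₁ κ₂ : Type} [LinearOrder κ₁] [LinearOrder κ₂] (k1 : α → κ₁) (k2 : α → κ₂)
    {a b c : α} (h1 : pvLe k1 k2 a b) (h2 : pvLe k1 k2 b c) : pvLe k1 k2 a c := by
  rcases h1 with h1 | ⟨h1, h1'⟩ <;> rcases h2 with h2 | ⟨h2, h2'⟩
  · exact Or.inl (lt_trans h1 h2)
  · exact Or.inl (h2 ▸ h1)
  · exact Or.inl (h1 ▸ h2)
  · exact Or.inr ⟨h1.trans h2, le_trans h1' h2'⟩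

-- `i1/d1/i2/d2` are whatever LT/DecidableLT instances the ports' `sorted2` picked up;
-- `hi1/hi2` say they agree with the canonical linear orders (at each use: `Iff.rfl`).
theorem pv_before_true {α κ₁ κ₂ : Type} [L1 : LinearOrder κ₁] [L2 : LinearOrder κ₂]
    {i1 : LT κ₁} {d1 : @DecidableLT κ₁ i1} {i2 : LT κ₂} {d2 : @DecidableLT κ₂ i2}
    (hi1 : ∀ a b : κ₁, @LT.lt _ i1 a b ↔
      @LT.lt κ₁ (@Preorder.toLT κ₁ (@PartialOrder.toPreorder κ₁ (@LinearOrder.toPartialOrder κ₁ L1))) a b)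
    (hi2 : ∀ a b : κ₂, @LT.lt _ i2 a b ↔
      @LT.lt κ₂ (@Preorder.toLT κ₂ (@PartialOrder.toPreorder κ₂ (@LinearOrder.toPartialOrder κ₂ L2))) a b)
    (k1 : α → κ₁) (k2 : α → κ₂) {a b : α}
    (h : (@decide _ (d1 (k1 a) (k1 b)) || (!(@decide _ (d1 (k1 b) (k1 a))) && @decide _ (d2 (k2 a) (k2 b)))) = true) :
    pvLe k1 k2 a b := by
  rcases (Bool.or_eq_true _ _) ▸ h with h | h
  · exact Or.inl ((hi1 _ _).mp (of_decide_eq_true h))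
  · obtain ⟨hna, hlt2⟩ := (Bool.and_eq_true _ _) ▸ h
    have hn1 := fun hc => (of_decide_eq_false ((Bool.not_eq_true' _) ▸ hna)) ((hi1 (k1 b) (k1 a)).mpr hc)
    have h2 := (hi2 (k2 a) (k2 b)).mp (of_decide_eq_true hlt2)
    rcases lt_or_eq_of_le (not_lt.mp hn1) with hlt | heq
    · exact Or.inl hlt
    · exact Or.inr ⟨heq, le_of_lt h2⟩

theorem pv_before_false {α κ₁ κ₂ : Type} [L1 : LinearOrder κ₁] [L2 : LinearOrder κ₂]
    {i1 : LT κ₁} {d1 : @DecidableLT κ₁ i1} {i2 : LT κ₂} {d2 : @DecidableLT κ₂ i2}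
    (hi1 : ∀ a b : κ₁, @LT.lt _ i1 a b ↔
      @LT.lt κ₁ (@Preorder.toLT κ₁ (@PartialOrder.toPreorder κ₁ (@LinearOrder.toPartialOrder κ₁ L1))) a b)
    (hi2 : ∀ a b : κ₂, @LT.lt _ i2 a b ↔
      @LT.lt κ₂ (@Preorder.toLT κ₂ (@PartialOrder.toPreorder κ₂ (@LinearOrder.toPartialOrder κ₂ L2))) a b)
    (k1 : α → κ₁) (k2 : α → κ₂) {a b : α}
    (h : (@decide _ (d1 (k1 a) (k1 b)) || (!(@decide _ (d1 (k1 b) (k1 a))) && @decide _ (d2 (k2 a) (k2 b)))) = false) :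
    pvLe k1 k2 b a := by
  obtain ⟨h1, h2⟩ := Bool.or_eq_false_iff.mp h
  have hn1 := fun hc => (of_decide_eq_false h1) ((hi1 (k1 a) (k1 b)).mpr hc)
  rcases Bool.and_eq_false_iff.mp h2 with h3 | h3
  · exact Or.inl ((hi1 _ _).mp (of_decide_eq_true ((Bool.not_eq_false' _) ▸ h3)))
  · have hn2 := fun hc => (of_decide_eq_false h3) ((hi2 (k2 a) (k2 b)).mpr hc)
    rcases lt_or_eq_of_le (not_lt.mp hn1) with hlt | heq
    · exact Or.inl hlt
    · exact Or.inr ⟨heq, not_lt.mp hn2⟩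

theorem pv_insertBy_pairwise {α κ₁ κ₂ : Type} [LinearOrder κ₁] [LinearOrder κ₂]
    (before : α → α → Bool) (k1 : α → κ₁) (k2 : α → κ₂)
    (hbt : ∀ a b, before a b = true → pvLe k1 k2 a b)
    (hbf : ∀ a b, before a b = false → pvLe k1 k2 b a)
    (x : α) (ys : List α) (h : ys.Pairwise (pvLe k1 k2)) :
    (PySem.List.insertBy before x ys).Pairwise (pvLe k1 k2) := by
  induction ys with
  | nil => simp [PySem.List.insertBy]
  | cons y t ih =>
    rcases List.pairwise_cons.mp h with ⟨hy, ht⟩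
    by_cases hb : before x y = true
    · rw [PySem.List.insertBy, if_pos hb]
      have hxy := hbt x y hb
      refine List.pairwise_cons.mpr ⟨?_, h⟩
      intro z hz
      rcases List.mem_cons.mp hz with rfl | hz
      · exact hxy
      · exact pvLe_trans k1 k2 hxy (hy _ hz)
    · rw [PySem.List.insertBy, if_neg hb]
      have hyx := hbf x y (Bool.eq_false_iff.mpr hb)
      refine List.pairwise_cons.mpr ⟨?_, ih ht⟩
      intro z hz
      rcases (PySem.List.insertBy_mem_iff _ _ _ _).mp hz with rfl | hz
      · exact hyx
      · exact hy _ hz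

theorem pv_foldl_insertBy_pairwise {α κ₁ κ₂ : Type} [LinearOrder κ₁] [LinearOrder κ₂]
    (before : α → α → Bool) (k1 : α → κ₁) (k2 : α → κ₂)
    (hbt : ∀ a b, before a b = true → pvLe k1 k2 a b)
    (hbf : ∀ a b, before a b = false → pvLe k1 k2 b a)
    (xs acc : List α) (h : acc.Pairwise (pvLe k1 k2)) :
    (xs.foldl (fun acc x => PySem.List.insertBy before x acc) acc).Pairwise (pvLe k1 k2) := by
  induction xs generalizing acc with
  | nil => exact h
  | cons x t ih => exact ih _ (pv_insertBy_pairwise before k1 k2 hbt hbf x acc h)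

-- naming lemma for the insertion sort behind sorted2: any pvLe-nondecreasing
-- rearrangement with (k1, k2) injective on the list is the result
theorem pv_isort_eq {α κ₁ κ₂ : Type} [LinearOrder κ₁] [LinearOrder κ₂]
    (before : α → α → Bool) (k1 : α → κ₁) (k2 : α → κ₂) (xs ys : List α)
    (hbt : ∀ a b, before a b = true → pvLe k1 k2 a b)
    (hbf : ∀ a b, before a b = false → pvLe k1 k2 b a)
    (hperm : ys.Perm xs)
    (hpw : ys.Pairwise (pvLe k1 k2))
    (hanti : ∀ a ∈ xs, ∀ b ∈ xs, k1 a = k1 b → k2 a = k2 b → a = b) :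
    xs.foldl (fun acc x => PySem.List.insertBy before x acc) [] = ys := by
  have hzperm : (xs.foldl (fun acc x => PySem.List.insertBy before x acc) []).Perm xs := by
    simpa using PySem.List.foldl_insertBy_perm before xs []
  have hzpw := pv_foldl_insertBy_pairwise before k1 k2 hbt hbf xs [] (by simp)
  refine List.Perm.eq_of_pairwise ?_ hzpw hpw (hzperm.trans hperm.symm)
  intro a b ha hb hab hba
  have ha' : a ∈ xs := hzperm.mem_iff.mp ha
  have hb' : b ∈ xs := hperm.mem_iff.mp hb
  rcases hab with h1 | ⟨h1, h1'⟩ <;> rcases hba with h2 | ⟨h2, h2'⟩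
  · exact absurd h2 (lt_asymm h1)
  · exact absurd h1 (h2 ▸ lt_irrefl _)
  · exact absurd h2 (h1 ▸ lt_irrefl _)
  · exact hanti a ha' b hb' h1 (le_antisymm h1' h2')

theorem pv_find?_beq_of_mem {g : String} : ∀ (KS : List String), g ∈ KS →
    KS.find? (fun k => k == g) = some g := by
  intro KS hg
  induction KS with
  | nil => simp at hg
  | cons k t ih =>
    by_cases hk : k = g
    · subst hk; exact List.find?_cons_of_pos (by simp)
    · rw [List.find?_cons_of_neg (by simpa using hk)]
      refine ih ?_
      rcases List.mem_cons.mp hg with h | h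
      · exact absurd h.symm hk
      · exact h

-- the dict that A's loop builds: keys KS (nodup, the group keys seen), value at k = paths with group key k
theorem pvGroupsDict_spec (paths : List String) :
    ∃ KS : List String, KS.Nodup ∧ (∀ k, k ∈ KS ↔ k ∈ paths.map _index_group_key) ∧
      (pvGroupsDict paths).items =
        KS.map (fun k => (k, paths.filter (fun p => _index_group_key p == k))) := by
  induction paths using List.reverseRecOn with
  | nil => exact ⟨[], by simp, by simp, by simp [pvGroupsDict]⟩
  | append_singleton pre p ih =>
    rcases ih with ⟨KS, hnd, hmem, hitems⟩
    have hstep : pvGroupsDict (pre ++ [p]) =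
        (pvGroupsDict pre).insert (_index_group_key p)
          ((pvGroupsDict pre).getD (_index_group_key p) [] ++ [p]) := by
      simp only [pvGroupsDict, List.foldl_append, List.foldl_cons, List.foldl_nil]
      rfl
    set g := _index_group_key p with hg
    have hfind : (pvGroupsDict pre).items.find? (fun q => q.1 == g) =
        if g ∈ KS then some (g, pre.filter (fun p' => _index_group_key p' == g)) else none := by
      rw [hitems, List.find?_map]
      by_cases hgk : g ∈ KS
      · rw [if_pos hgk]
        have hco : ((fun (q : String × List String) => q.1 == g) ∘
            (fun k => (k, pre.filter (fun p' => _index_group_key p' == k)))) = fun k => k == g := rfl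
        rw [hco, pv_find?_beq_of_mem KS hgk]; rfl
      · rw [if_neg hgk]
        have hnone : List.find? ((fun (q : String × List String) => q.1 == g) ∘
            (fun k => (k, pre.filter (fun p' => _index_group_key p' == k)))) KS = none :=
          List.find?_eq_none.mpr (by
            intro x hx hbeq
            have hxg : x = g := by simpa [Function.comp] using hbeq
            exact hgk (hxg ▸ hx))
        rw [hnone, Option.map_none]
    have hmemnew : ∀ k, (k ∈ (pre ++ [p]).map _index_group_key) ↔ (k ∈ pre.map _index_group_key ∨ k = g) := by
      intro k
      simp only [hg, List.map_append]
      simp [eq_comm]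
    by_cases hgk : g ∈ KS
    · -- existing key: insert overwrites in place
      have hf : (pvGroupsDict pre).items.find? (fun q => q.1 == g) =
          some (g, pre.filter (fun p' => _index_group_key p' == g)) := by rw [hfind, if_pos hgk]
      have hcont : (pvGroupsDict pre).contains g = true := by
        simp only [PySem.Dict.contains, List.any_eq_true]
        exact ⟨_, List.mem_of_find?_eq_some hf, by simp⟩
      have hget : (pvGroupsDict pre).getD g [] = pre.filter (fun p' => _index_group_key p' == g) := by
        simp only [PySem.Dict.getD, PySem.Dict.get?, hf, Option.map_some, Option.getD_some]
      refine ⟨KS, hnd, ?_, ?_⟩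
      · intro k
        rw [hmem k, hmemnew k]
        constructor
        · exact Or.inl
        · rintro (h | rfl)
          · exact h
          · exact (hmem g).mp hgk
      · rw [hstep]
        simp only [PySem.Dict.insert, hcont, hget, if_true]
        rw [hitems, List.map_map]
        refine List.map_congr_left ?_
        intro k _
        by_cases hkg : k = g
        · subst hkg
          simp [List.filter_append, ← hg]
        · have h1 : (k == g) = false := by simpa using hkg
          have h2 : (g == k) = false := by simpa using (Ne.symm hkg)
          simp [Function.comp, h1, List.filter_append, ← hg, h2]
    · -- new key: appended at the end
      have hf : (pvGroupsDict pre).items.find? (fun q => q.1 == g) = none := by rw [hfind, if_neg hgk]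
      have hcont : (pvGroupsDict pre).contains g = false := by
        simp only [PySem.Dict.contains, List.any_eq_false]
        exact List.find?_eq_none.mp hf
      have hget : (pvGroupsDict pre).getD g [] = [] := by
        simp only [PySem.Dict.getD, PySem.Dict.get?, hf, Option.map_none, Option.getD_none]
      have hfilg : pre.filter (fun p' => _index_group_key p' == g) = [] := by
        rw [List.filter_eq_nil_iff]
        intro a ha hbeq
        exact hgk ((hmem g).mpr (List.mem_map.mpr ⟨a, ha, eq_of_beq (by simpa using hbeq)⟩))
      refine ⟨KS ++ [g], ?_, ?_, ?_⟩
      · rw [List.nodup_append]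
        refine ⟨hnd, List.nodup_singleton g, ?_⟩
        intro a ha b hb
        rw [List.mem_singleton] at hb
        subst hb
        exact fun h => hgk (h ▸ ha)
      · intro k
        rw [List.mem_append, List.mem_singleton, hmem k, hmemnew k]
      · rw [hstep]
        simp only [PySem.Dict.insert, hcont, Bool.false_eq_true, if_false, hget]
        rw [hitems, List.map_append, List.map_singleton]
        congr 1
        · refine List.map_congr_left ?_
          intro k hk
          have hkg : (g == k) = false := by
            simp only [beq_eq_false_iff_ne, ne_eq]
            exact fun h => hgk (h ▸ hk)
          simp [List.filter_append, ← hg, hkg]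
        · simp [List.filter_append, ← hg, hfilg]

def pvCanonGroups (paths : List String) : List (String × List String) :=
  (pvSK paths).map (fun k => (k, pvGRP paths k))

def pvCanonPairs (paths : List String) : List (String × String) :=
  (pvSK paths).flatMap (fun k => (pvGRP paths k).map (fun p => (k, p)))

theorem pvSK_nodup (paths : List String) : (pvSK paths).Nodup :=
  ((PySem.List.sorted_perm (PySem.List.dedup (paths.map _index_group_key)) (fun k => k) false).symm).nodup
    (PySem.List.nodup_dedup _)

theorem pvSK_mem (paths : List String) (k : String) :
    k ∈ pvSK paths ↔ k ∈ paths.map _index_group_key := by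
  rw [pvSK, (PySem.List.sorted_perm _ _ false).mem_iff, PySem.List.mem_dedup]

theorem pvSK_pairwise_lt (paths : List String) : (pvSK paths).Pairwise (· < ·) := by
  have h1 := PySem.List.sorted_pairwise (PySem.List.dedup (paths.map _index_group_key)) (fun k => k)
  have h2 : (pvSK paths).Pairwise (· ≠ ·) := pvSK_nodup paths
  exact (h1.and h2).imp (fun h => lt_of_le_of_ne h.1 h.2)

-- A's grouping function computes the canonical groups
theorem pvA_groups (paths : List String) :
    _group_paths_for_index paths = pvCanonGroups paths := by
  obtain ⟨KS, hnd, hmem, hitems⟩ := pvGroupsDict_spec paths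
  have hxs : (pvGroupsDict paths).items.map (fun kv => (kv.1, PySem.List.sorted kv.2 (fun v => v)))
      = KS.map (fun k => (k, pvGRP paths k)) := by
    rw [hitems, List.map_map]; rfl
  unfold _group_paths_for_index pvCanonGroups
  rw [hxs]
  simp only [PySem.List.sorted2, Bool.false_eq_true, if_false]
  refine pv_isort_eq _ (fun gv : String × List String => gv.1) (fun gv => gv.2) _ _ ?_ ?_ ?_ ?_ ?_
  · intro a b h
    exact pv_before_true (fun _ _ => Iff.rfl) (fun _ _ => Iff.rfl) _ _ h
  · intro a b h
    exact pv_before_false (fun _ _ => Iff.rfl) (fun _ _ => Iff.rfl) _ _ h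
  · refine List.Perm.map _ ?_
    rw [List.perm_ext_iff_of_nodup (pvSK_nodup paths) hnd]
    intro a; rw [pvSK_mem, hmem]
  · rw [List.pairwise_map]
    exact (pvSK_pairwise_lt paths).imp (fun h => Or.inl h)
  · intro a ha b hb h1 _
    obtain ⟨ka, _, rfl⟩ := List.mem_map.mp ha
    obtain ⟨kb, _, rfl⟩ := List.mem_map.mp hb
    simp only at h1
    rw [h1]

-- partitioning a list by its (nodup, covering) key values is a permutation
theorem pv_partition {α κ : Type} [BEq κ] [LawfulBEq κ] (key : α → κ) :
    ∀ (ks : List κ) (l : List α), ks.Nodup → (∀ x ∈ l, key x ∈ ks) →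
      (ks.flatMap (fun k => l.filter (fun x => key x == k))).Perm l := by
  intro ks
  induction ks with
  | nil =>
    intro l _ hcov
    have hl : l = [] := List.eq_nil_iff_forall_not_mem.mpr (fun x hx => by simpa using hcov x hx)
    simp [hl]
  | cons k ks ih =>
    intro l hnd hcov
    rcases List.pairwise_cons.mp hnd with ⟨hk, hnd'⟩
    have hstep : ∀ k' ∈ ks, l.filter (fun x => key x == k') =
        (l.filter (fun x => !(key x == k))).filter (fun x => key x == k') := by
      intro k' hk'
      rw [List.filter_filter]
      refine List.filter_congr ?_
      intro x _
      by_cases h : (key x == k') = true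
      · have hxk : (key x == k) = false := by
          simp only [beq_eq_false_iff_ne, ne_eq]
          intro hkk
          exact (hk k' hk') (by rw [← hkk, eq_of_beq h])
        simp [h, hxk]
      · simp [Bool.eq_false_iff.mpr h]
    rw [List.flatMap_cons, List.flatMap_congr hstep]
    have hcov' : ∀ x ∈ l.filter (fun x => !(key x == k)), key x ∈ ks := by
      intro x hx
      rcases List.mem_filter.mp hx with ⟨hxl, hxk⟩
      rcases List.mem_cons.mp (hcov x hxl) with h | h
      · simp [h] at hxk
      · exact h
    exact ((ih _ hnd' hcov').append_left _).trans (List.filter_append_perm _ l)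

-- B's sorted pair list is the canonical pair list
theorem pvB_pairs (paths : List String) :
    PySem.List.sorted2 (paths.map (fun path => (_index_group_key path, path)))
      (fun kp => kp.1) (fun kp => kp.2) = pvCanonPairs paths := by
  simp only [PySem.List.sorted2, Bool.false_eq_true, if_false]
  refine pv_isort_eq _ (fun kp : String × String => kp.1) (fun kp => kp.2) _ _ ?_ ?_ ?_ ?_ ?_
  · intro a b h
    exact pv_before_true (fun _ _ => Iff.rfl) (fun _ _ => Iff.rfl) _ _ h
  · intro a b h
    exact pv_before_false (fun _ _ => Iff.rfl) (fun _ _ => Iff.rfl) _ _ h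
  · -- pvCanonPairs ~ paths.map (fun p => (key p, p))
    have c1 : (pvCanonPairs paths).Perm
        ((pvSK paths).flatMap (fun k =>
          (paths.filter (fun p => _index_group_key p == k)).map (fun p => (k, p)))) := by
      refine List.Perm.flatMap (List.Perm.refl _) ?_
      intro k _
      exact List.Perm.map _ (PySem.List.sorted_perm _ _ false)
    have c2 : ((pvSK paths).flatMap (fun k =>
          (paths.filter (fun p => _index_group_key p == k)).map (fun p => (k, p)))) =
        ((pvSK paths).flatMap (fun k =>
          (paths.filter (fun p => _index_group_key p == k)).map (fun p => (_index_group_key p, p)))) := by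
      refine List.flatMap_congr ?_
      intro k _
      refine List.map_congr_left ?_
      intro p hp
      rw [eq_of_beq (List.mem_filter.mp hp).2]
    have c3 : ((pvSK paths).flatMap (fun k =>
          (paths.filter (fun p => _index_group_key p == k)).map (fun p => (_index_group_key p, p)))).Perm
        ((PySem.List.dedup (paths.map _index_group_key)).flatMap (fun k =>
          (paths.filter (fun p => _index_group_key p == k)).map (fun p => (_index_group_key p, p)))) :=
      List.Perm.flatMap (PySem.List.sorted_perm _ _ false) (fun _ _ => List.Perm.refl _)
    have c4 : ((PySem.List.dedup (paths.map _index_group_key)).flatMap (fun k =>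
          (paths.filter (fun p => _index_group_key p == k)).map (fun p => (_index_group_key p, p)))) =
        ((PySem.List.dedup (paths.map _index_group_key)).flatMap (fun k =>
          paths.filter (fun p => _index_group_key p == k))).map (fun p => (_index_group_key p, p)) :=
      List.map_flatMap.symm
    have c5 : ((PySem.List.dedup (paths.map _index_group_key)).flatMap (fun k =>
          paths.filter (fun p => _index_group_key p == k))).Perm paths :=
      pv_partition _ _ _ (PySem.List.nodup_dedup _)
        (fun x hx => (PySem.List.mem_dedup _ _).mpr (List.mem_map_of_mem hx))
    have e1 := c2 ▸ c1
    have e2 := e1.trans c3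
    have e3 := c4 ▸ e2
    exact e3.trans (c5.map _)
  · -- pairwise
    rw [pvCanonPairs, List.pairwise_flatMap]
    constructor
    · intro k _
      rw [List.pairwise_map]
      exact (PySem.List.sorted_pairwise _ _).imp (fun h => Or.inr ⟨rfl, h⟩)
    · refine (pvSK_pairwise_lt paths).imp ?_
      intro k k' hlt x hx y hy
      obtain ⟨p, _, rfl⟩ := List.mem_map.mp hx
      obtain ⟨p', _, rfl⟩ := List.mem_map.mp hy
      exact Or.inl hlt
  · intro a _ b _ h1 h2
    exact Prod.ext h1 h2

-- ── rendering: character-level canonical forms ──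

-- one "- `path`" body line with its preceding newline
def pvLineC (p : String) : List Char := '\n' :: '-' :: ' ' :: '`' :: (p.toList ++ ['`'])

-- one group block as B emits it: blank line, header, body lines
def pvBlkC (k : String) (ps : List String) : List Char :=
  '\n' :: '\n' :: '#' :: '#' :: ' ' :: (k.toList ++ (ps.map pvLineC).flatten)

def pvBodyC (paths : List String) : List Char :=
  ((pvSK paths).map (fun k => pvBlkC k (pvGRP paths k))).flatten

-- B's loop step, named for the lemmas (definitionally the port's lambda)
def pvStep (st : String × Option String) (q : String × String) : String × Option String :=
  let st := if st.2 == some q.1 then st else (st.1 ++ "\n\n## " ++ q.1, some q.1)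
  (st.1 ++ "\n- `" ++ q.2 ++ "`", st.2)

theorem pvStep_toList_same (out : String) (k p : String) :
    pvStep (out, some k) (k, p) = (String.ofList (out.toList ++ pvLineC p), some k) := by
  simp only [pvStep, beq_self_eq_true, if_pos]
  refine Prod.ext ?_ rfl
  refine String.toList_inj.mp ?_
  simp [String.toList_append, pvLineC]

theorem pvStep_toList_new (out : String) (prev : Option String) (k p : String)
    (h : prev ≠ some k) :
    pvStep (out, prev) (k, p) =
      (String.ofList (out.toList ++ '\n' :: '\n' :: '#' :: '#' :: ' ' :: k.toList ++ pvLineC p), some k) := by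
  have hb : (prev == some k) = false := beq_eq_false_iff_ne.mpr h
  simp only [pvStep, hb, Bool.false_eq_true, if_false]
  refine Prod.ext ?_ rfl
  refine String.toList_inj.mp ?_
  simp [String.toList_append, pvLineC]

-- inner loop of B over one group's remaining paths: prev stays, lines accumulate
theorem pvB_inner (k : String) : ∀ (ps : List String) (out : String),
    (ps.map (fun p => (k, p))).foldl pvStep (out, some k)
      = (String.ofList (out.toList ++ (ps.map pvLineC).flatten), some k) := by
  intro ps
  induction ps with
  | nil => intro out; simp
  | cons p t ih =>
    intro out
    rw [List.map_cons, List.foldl_cons, pvStep_toList_same, ih]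
    congr 1
    refine String.toList_inj.mp ?_
    simp

-- outer loop of B over the canonical pairs, group by group
theorem pvB_fold : ∀ (ks : List String) (f : String → List String) (out : String) (prev : Option String),
    (∀ k ∈ ks, f k ≠ []) → ks.Pairwise (· ≠ ·) → (∀ k ∈ ks, prev ≠ some k) →
    ((ks.flatMap (fun k => (f k).map (fun p => (k, p)))).foldl pvStep (out, prev)).1
      = String.ofList (out.toList ++ (ks.map (fun k => pvBlkC k (f k))).flatten) := by
  intro ks
  induction ks with
  | nil =>
    intro f out prev _ _ _
    simp
  | cons k t ih =>
    intro f out prev hne hpw hprev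
    obtain ⟨p₀, ps, hfk⟩ : ∃ p₀ ps, f k = p₀ :: ps := by
      cases hfk : f k with
      | nil => exact absurd hfk (hne k List.mem_cons_self)
      | cons a l => exact ⟨a, l, rfl⟩
    rcases List.pairwise_cons.mp hpw with ⟨hk, hpw'⟩
    rw [List.flatMap_cons, List.foldl_append, hfk, List.map_cons, List.foldl_cons,
      pvStep_toList_new out prev k p₀ (hprev k List.mem_cons_self), pvB_inner]
    have h1 : ∀ k' ∈ t, f k' ≠ [] := fun k' h => hne k' (List.mem_cons_of_mem _ h)
    have h3 : ∀ k' ∈ t, (some k : Option String) ≠ some k' :=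
      fun k' h hc => hk k' h (Option.some_inj.mp hc)
    have ih' := ih f (String.ofList
        ((String.ofList (out.toList ++ '\n' :: '\n' :: '#' :: '#' :: ' ' :: k.toList ++ pvLineC p₀)).toList ++
          (List.map pvLineC ps).flatten)) (some k) h1 hpw' h3
    refine ih'.trans ?_
    refine congrArg String.ofList ?_
    rw [String.toList_ofList, String.toList_ofList, List.map_cons, List.flatten_cons, hfk]
    simp [pvBlkC, List.append_assoc]

-- A's rendering loop produces the header lines followed by the blocks' lines
def pvLines (gp : String × List String) : List String :=
  ("## " ++ gp.1) :: (gp.2.map (fun p => "- `" ++ p ++ "`") ++ [""])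

theorem pvA_fold : ∀ (gs : List (String × List String)) (lines : List String),
    gs.foldl
      (fun lines gp =>
        (gp.2.foldl (fun ls path => ls ++ ["- `" ++ path ++ "`"]) (lines ++ ["## " ++ gp.1])) ++ [""])
      lines
    = lines ++ gs.flatMap pvLines := by
  intro gs
  induction gs with
  | nil => intro lines; simp
  | cons gp t ih =>
    intro lines
    rw [List.foldl_cons, PySem.List.foldl_append_singleton_eq_map, ih]
    simp [pvLines]

-- '\n'.join written with a distinguished first line
theorem pv_join_NL : ∀ (ls : List (List Char)) (x : List Char),
    List.intercalate ['\n'] (x :: ls) = x ++ (ls.map (fun l => '\n' :: l)).flatten := by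
  intro ls
  induction ls with
  | nil => intro x; simp [List.intercalate]
  | cons y t ih =>
    intro x
    have h : List.intercalate ['\n'] (x :: y :: t) = x ++ ['\n'] ++ List.intercalate ['\n'] (y :: t) := by
      simp [List.intercalate]
    rw [h, ih y]
    simp

-- moving the leading '\n' of the body into the blocks
theorem pv_shift : ∀ (gs : List (String × List String)),
    ['\n'] ++ (gs.map (fun gp => ('\n' :: '#' :: '#' :: ' ' :: (gp.1.toList ++ (gp.2.map pvLineC).flatten)) ++ ['\n'])).flatten
      = (gs.map (fun gp => '\n' :: '\n' :: '#' :: '#' :: ' ' :: (gp.1.toList ++ (gp.2.map pvLineC).flatten))).flatten ++ ['\n'] := by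
  intro bs
  induction bs with
  | nil => simp
  | cons b t ih =>
    simp only [List.map_cons, List.flatten_cons, List.cons_append, List.nil_append,
      List.append_assoc] at ih ⊢
    rw [ih]

theorem pvLine_toList (p : String) :
    '\n' :: ("- `" ++ p ++ "`").toList = pvLineC p := by
  rw [String.toList_append, String.toList_append]; rfl

-- the lines of one group's blocks, '\n'-prefixed and flattened, are the blocks minus one '\n'
theorem pv_body_NL : ∀ (gs : List (String × List String)),
    ((gs.flatMap pvLines).map (fun s => '\n' :: s.toList)).flatten
      = (gs.map (fun gp => ('\n' :: '#' :: '#' :: ' ' :: (gp.1.toList ++ (gp.2.map pvLineC).flatten)) ++ ['\n'])).flatten := by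
  intro gs
  induction gs with
  | nil => simp
  | cons gp t ih =>
    simp only [List.flatMap_cons, List.map_append, List.flatten_append, ih, List.map_cons,
      List.flatten_cons]
    congr 1
    simp only [pvLines, List.map_cons, List.map_append, List.flatten_cons, List.flatten_append,
      List.map_map]
    rw [show List.map ((fun s => '\n' :: s.toList) ∘ fun p => "- `" ++ p ++ "`") gp.2
        = List.map pvLineC gp.2 from List.map_congr_left (fun p _ => pvLine_toList p),
      show '\n' :: ("## " ++ gp.1).toList = '\n' :: '#' :: '#' :: ' ' :: gp.1.toList from by
        rw [String.toList_append]; rfl]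
    simp

theorem pv_flat_last : ∀ (bs : List (List Char)), bs ≠ [] → (∀ b ∈ bs, b.getLast? = some '`') →
    bs.flatten.getLast? = some '`' := by
  intro bs
  induction bs with
  | nil => intro h _; exact absurd rfl h
  | cons b t ih =>
    intro _ hall
    cases t with
    | nil => simpa using hall b List.mem_cons_self
    | cons a l =>
      rw [List.flatten_cons]
      have htl := ih (by simp) (fun x hx => hall x (List.mem_cons_of_mem _ hx))
      have hne : (List.flatten (a :: l)) ≠ [] := by
        intro hc; rw [hc] at htl; simp at htl
      rw [List.getLast?_append_of_ne_nil _ hne]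
      exact htl

theorem pvLineC_last (p : String) : (pvLineC p).getLast? = some '`' := by
  rw [show pvLineC p = ('\n' :: '-' :: ' ' :: '`' :: p.toList) ++ ['`'] from by simp [pvLineC],
    List.getLast?_concat]

theorem pv_getLast?_lines (ps : List String) (hps : ps ≠ []) :
    ((ps.map pvLineC).flatten).getLast? = some '`' := by
  refine pv_flat_last _ (by simpa using hps) ?_
  intro b hb
  obtain ⟨p, _, rfl⟩ := List.mem_map.mp hb
  exact pvLineC_last p

theorem pv_getLast?_body (paths : List String) (h : pvSK paths ≠ []) :
    (pvBodyC paths).getLast? = some '`' := by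
  refine pv_flat_last _ (by simpa [pvBodyC] using h) ?_
  intro b hb
  obtain ⟨k, hk, rfl⟩ := List.mem_map.mp hb
  have hne : pvGRP paths k ≠ [] := by
    rw [pvSK_mem] at hk
    obtain ⟨p, hp, hkey⟩ := List.mem_map.mp hk
    rw [Ne, pvGRP, PySem.List.sorted_eq_nil_iff]
    intro hnil
    have hmem : p ∈ paths.filter (fun p' => _index_group_key p' == k) :=
      List.mem_filter.mpr ⟨hp, by simp [hkey]⟩
    rw [hnil] at hmem
    simp at hmem
  have hfl := pv_getLast?_lines (pvGRP paths k) hne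
  have hflne : ((pvGRP paths k).map pvLineC).flatten ≠ [] := by
    intro hc; rw [hc] at hfl; simp at hfl
  simp only [pvBlkC]
  rw [show ('\n' :: '\n' :: '#' :: '#' :: ' ' :: (k.toList ++ ((pvGRP paths k).map pvLineC).flatten))
      = ('\n' :: '\n' :: '#' :: '#' :: ' ' :: k.toList) ++ ((pvGRP paths k).map pvLineC).flatten by simp,
    List.getLast?_append_of_ne_nil _ hflne]
  exact hfl

-- Python's rstrip removes exactly a final newline after a non-space character
theorem pv_rstrip_newline (l : List Char) (c : Char) (hl : l.getLast? = some c)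
    (hc : PySem.Chars.isspace c = false) : PySem.Chars.rstrip (l ++ ['\n']) = l := by
  unfold PySem.Chars.rstrip
  have h2 : l.reverse.head? = l.getLast? := List.head?_reverse
  cases hrev : l.reverse with
  | nil =>
    rw [List.reverse_eq_nil_iff.mp hrev] at hl
    simp at hl
  | cons d t =>
    have hd : d = c := by
      rw [hrev, List.head?_cons, hl] at h2
      exact Option.some_inj.mp h2
    subst hd
    rw [List.reverse_append, show (['\n'] : List Char).reverse = ['\n'] from rfl,
      List.singleton_append, List.dropWhile_cons]
    simp only [show PySem.Chars.isspace '\n' = true from by decide, if_true]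
    rw [hrev, List.dropWhile_cons]
    simp only [hc, Bool.false_eq_true, if_false]
    rw [← hrev, List.reverse_reverse]

-- the full A-side string, character by character
set_option maxRecDepth 16384 in
theorem pvA_chars (paths : List String) :
    (PySem.Str.join "\n" (pvHeader ++ (pvCanonGroups paths).flatMap pvLines)).toList
      = pvHeaderB.toList ++ pvBodyC paths ++ ['\n'] := by
  have hJ : (PySem.Str.join "\n" (pvHeader ++ (pvCanonGroups paths).flatMap pvLines)).toList
      = List.intercalate ['\n'] ((pvHeader ++ (pvCanonGroups paths).flatMap pvLines).map String.toList) := by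
    simp [PySem.Str.join, PySem.Chars.join]
  rw [hJ]
  have hmap : (pvHeader ++ (pvCanonGroups paths).flatMap pvLines).map String.toList
      = (pvHeader.map String.toList) ++ (((pvCanonGroups paths).flatMap pvLines).map String.toList) := by
    rw [List.map_append]
  rw [hmap]
  have hhd : pvHeader.map String.toList =
      "Use this for oracle workflows when you want the model to request exact files by path.".toList ::
      ["Pair with `context/REPO_ARCHITECTURE.md`, not instead of it.".toList,
       "For implementation work, still provide raw source of the files you expect to edit.".toList,
       "".toList, "# File Index".toList, "".toList] := rfl
  rw [hhd, List.cons_append, pv_join_NL]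
  rw [List.map_append, List.flatten_append, List.map_map]
  rw [show ((fun l => '\n' :: l) ∘ String.toList) = (fun s : String => '\n' :: s.toList) from rfl,
    pv_body_NL]
  have hB := pv_shift (pvCanonGroups paths)
  have hblk : ((pvCanonGroups paths).map
      (fun gp => '\n' :: '\n' :: '#' :: '#' :: ' ' :: (gp.1.toList ++ (gp.2.map pvLineC).flatten))).flatten
      = pvBodyC paths := by
    unfold pvBodyC pvCanonGroups
    rw [List.map_map]
    rfl
  rw [hblk] at hB
  -- assemble: header-tail flatten is a literal list ending in ['\n'], then shift the body
  have hsplit : (["Pair with `context/REPO_ARCHITECTURE.md`, not instead of it.".toList,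
       "For implementation work, still provide raw source of the files you expect to edit.".toList,
       "".toList, "# File Index".toList, "".toList].map (fun l => '\n' :: l)).flatten
      = "\nPair with `context/REPO_ARCHITECTURE.md`, not instead of it.\nFor implementation work, still provide raw source of the files you expect to edit.\n\n# File Index".toList ++ ['\n'] := by
    decide
  rw [hsplit, List.append_assoc, hB, pvHeaderB]
  rw [show ("Use this for oracle workflows when you want the model to request exact files by path.\nPair with `context/REPO_ARCHITECTURE.md`, not instead of it.\nFor implementation work, still provide raw source of the files you expect to edit.\n\n# File Index").toList
      = "Use this for oracle workflows when you want the model to request exact files by path.".toList ++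
        "\nPair with `context/REPO_ARCHITECTURE.md`, not instead of it.\nFor implementation work, still provide raw source of the files you expect to edit.\n\n# File Index".toList from by decide]
  simp

set_option maxRecDepth 16384 in
set_option maxHeartbeats 1600000 in
theorem pv_main (file_inventory : List String) :
    render_file_index file_inventory = render_file_index_alt file_inventory := by
  refine String.toList_inj.mp ?_
  have hGne : ∀ k ∈ pvSK file_inventory, pvGRP file_inventory k ≠ [] := by
    intro k hk
    rw [pvSK_mem] at hk
    obtain ⟨p, hp, hkey⟩ := List.mem_map.mp hk
    rw [Ne, pvGRP, PySem.List.sorted_eq_nil_iff]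
    intro hnil
    have hmem : p ∈ file_inventory.filter (fun p' => _index_group_key p' == k) :=
      List.mem_filter.mpr ⟨hp, by simp [hkey]⟩
    rw [hnil] at hmem
    simp at hmem
  -- B side
  have hB : (render_file_index_alt file_inventory).toList
      = pvHeaderB.toList ++ pvBodyC file_inventory ++ ['\n'] := by
    have hfold := pvB_fold (pvSK file_inventory) (pvGRP file_inventory) pvHeaderB none
      hGne (pvSK_nodup file_inventory) (fun _ _ => by simp)
    simp only [render_file_index_alt]
    unfold pvCanonPairs at hfold
    conv_lhs =>
      rw [pvB_pairs]
      unfold pvCanonPairs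
      rw [show (fun (st : String × Option String) q =>
            let st := if st.2 == some q.1 then st else (st.1 ++ "\n\n## " ++ q.1, some q.1)
            (st.1 ++ "\n- `" ++ q.2 ++ "`", st.2)) = pvStep from rfl]
      rw [hfold]
    rw [String.toList_append, String.toList_ofList,
      show ("\n" : String).toList = ['\n'] from rfl]
    simp [pvBodyC, List.append_assoc]
  -- A side
  have hA : (render_file_index file_inventory).toList
      = PySem.Chars.rstrip (pvHeaderB.toList ++ pvBodyC file_inventory ++ ['\n']) ++ ['\n'] := by
    simp only [render_file_index]
    conv_lhs =>
      rw [pvA_groups, pvA_fold, String.toList_append,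
        show ("\n" : String).toList = ['\n'] from rfl,
        PySem.Str.toList_rstrip, pvA_chars]
  -- the string before the final newline ends in a non-space character
  have hlast : (pvHeaderB.toList ++ pvBodyC file_inventory).getLast? = some '`' ∨
      (pvHeaderB.toList ++ pvBodyC file_inventory).getLast? = some 'x' := by
    by_cases hsk : pvSK file_inventory = []
    · right
      have : pvBodyC file_inventory = [] := by simp [pvBodyC, hsk]
      rw [this, List.append_nil]
      decide
    · left
      have hb := pv_getLast?_body file_inventory hsk
      have hbne : pvBodyC file_inventory ≠ [] := by
        intro hc; rw [hc] at hb; simp at hb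
      rw [List.getLast?_append_of_ne_nil _ hbne]
      exact hb
  have hr : PySem.Chars.rstrip ((pvHeaderB.toList ++ pvBodyC file_inventory) ++ ['\n'])
      = pvHeaderB.toList ++ pvBodyC file_inventory := by
    rcases hlast with h | h
    · exact pv_rstrip_newline _ '`' h (by decide)
    · exact pv_rstrip_newline _ 'x' h (by decide)
  calc (render_file_index file_inventory).toList
      = PySem.Chars.rstrip (pvHeaderB.toList ++ pvBodyC file_inventory ++ ['\n']) ++ ['\n'] := hA
    _ = PySem.Chars.rstrip ((pvHeaderB.toList ++ pvBodyC file_inventory) ++ ['\n']) ++ ['\n'] := by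
        rw [List.append_assoc]
    _ = (pvHeaderB.toList ++ pvBodyC file_inventory) ++ ['\n'] := by rw [hr]
    _ = pvHeaderB.toList ++ pvBodyC file_inventory ++ ['\n'] := by rw [List.append_assoc]
    _ = (render_file_index_alt file_inventory).toList := hB.symm

-- ===== VERDICT (by name: the statement is the Claim_ definition above) =====
theorem render_file_index_spec : Claim_equal_render_file_index := by
  intro file_inventory _
  exact pv_main file_inventory
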